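-- pv_equiv track=rewrite | github.com/shsargordi/DICOM-to-NIFTI- | dcm_extraction_plastimatch-CT-CBCT.py | find_matching_ct
-- ===== SOURCE A (Python) =====
-- def find_matching_ct(ct_folders, study_date):
--     """Find the best matching CT folder for the given study date."""
--     # First try exact match
--     exact_match = [f for f in ct_folders if f.split('.')[-2] == study_date]
--     if exact_match:
--         return exact_match[0]
--
--     # If no exact match, try finding CT from the same date (ignoring trailing numbers)
--     date_matches = [f for f in ct_folders if study_date in f]
--     if date_matches:
--         return date_matches[0]
--
--     # If still no match, return the first CT folder
--     return ct_folders[0] if ct_folders else None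
-- ===== SOURCE B (Python) =====
-- def find_matching_ct(ct_folders, study_date):
--     """Find the best matching CT folder for the given study date."""
--     def rank(f):
--         if f.split('.')[-2] == study_date:
--             return 0
--         if study_date in f:
--             return 1
--         return 2
--     ranked = [(rank(f), i, f) for i, f in enumerate(ct_folders)]
--     return min(ranked)[2] if ranked else None
-- ===== Notes on version B (the rewrite author's own statement) =====
-- stated objective: alternative
-- what changed: Replaces A's staged filtering (exact-match pass, then substring pass, then head fallback) by a ranking scheme: each folder gets a priority key (rank, index) and the answer is min() of the ranked list, so one min-by-key selection subsumes all three tiers.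
import Mathlib
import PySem

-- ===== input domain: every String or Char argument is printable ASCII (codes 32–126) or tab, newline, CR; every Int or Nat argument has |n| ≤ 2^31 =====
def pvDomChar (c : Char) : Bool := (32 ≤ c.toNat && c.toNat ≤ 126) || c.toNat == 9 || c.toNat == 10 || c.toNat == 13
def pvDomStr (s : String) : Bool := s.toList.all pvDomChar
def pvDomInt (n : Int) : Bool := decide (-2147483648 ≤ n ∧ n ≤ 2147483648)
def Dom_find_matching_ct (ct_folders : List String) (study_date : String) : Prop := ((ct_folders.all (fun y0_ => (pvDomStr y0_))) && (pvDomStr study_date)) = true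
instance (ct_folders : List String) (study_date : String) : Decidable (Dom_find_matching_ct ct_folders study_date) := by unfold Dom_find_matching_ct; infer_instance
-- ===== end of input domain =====

-- B replaces A's staged filtering by a ranking scheme: each folder gets a priority key
-- (rank, index) and the answer is min() of the ranked list (objective: alternative).

-- ===== PORT A =====
-- f.split('.')[-2]; exact under Pre_ (a folder with no '.' raises IndexError in Python,
-- where pyGet? is none; the getD default is never reached inside Pre_).
def pvKey (f : String) : String :=
  (PySem.List.pyGet? ((PySem.Str.split? f ".").getD []) (-2)).getD ""

def find_matching_ct (ct_folders : List String) (study_date : String) : Option String :=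
  let exact_match := ct_folders.filter (fun f => pvKey f == study_date)
  match exact_match with
  | f :: _ => some f
  | [] =>
    let date_matches := ct_folders.filter (fun f => PySem.Str.isIn study_date f)
    match date_matches with
    | f :: _ => some f
    | [] =>
      match ct_folders with
      | f :: _ => some f
      | [] => none

-- ===== PORT B =====
-- rank(f) from Source B
def pvRank (study_date f : String) : Int :=
  if pvKey f == study_date then 0
  else if PySem.Str.isIn study_date f then 1
  else 2

-- Python's tuple '<' on the ranked triples; the third (string) component is never
-- consulted because the enumerate indices are pairwise distinct, so comparing the
-- first two components is exact here.
def pvLt (x y : Int × Int × String) : Bool :=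
  x.1 < y.1 || (x.1 == y.1 && x.2.1 < y.2.1)

-- min(ranked): Python's min is the running minimum keeping the FIRST minimal element.
def find_matching_ct_alt (ct_folders : List String) (study_date : String) : Option String :=
  let ranked := (PySem.List.enumerate ct_folders 0).map
    (fun p => (pvRank study_date p.2, p.1, p.2))
  match ranked with
  | [] => none
  | x :: xs => some ((xs.foldl (fun best y => if pvLt y best then y else best) x).2.2)

-- ===== PRECONDITION & SPEC =====
-- Pre_ excludes lists containing a folder without '.', on which the Python A (and B)
-- raises IndexError at f.split('.')[-2].
def Pre_find_matching_ct (ct_folders : List String) (study_date : String) : Prop :=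
  ct_folders.all (fun f => PySem.Str.isIn "." f) = true
instance (ct_folders : List String) (study_date : String) : Decidable (Pre_find_matching_ct ct_folders study_date) := by unfold Pre_find_matching_ct; infer_instance

def pvWitness_find_matching_ct : List String × String :=
  (["ct.20240101.1", "ct.20240202.2"], "20240202")

def Spec_find_matching_ct (ct_folders : List String) (study_date : String) (out : Option String) : Prop := out = find_matching_ct_alt ct_folders study_date
instance (ct_folders : List String) (study_date : String) (out : Option String) : Decidable (Spec_find_matching_ct ct_folders study_date out) := by unfold Spec_find_matching_ct; infer_instance

-- ===== CLAIM (what is proved, stated in full; the proofs are below) =====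
def Claim_equal_find_matching_ct : Prop := ∀ (ct_folders : List String) (study_date : String), Dom_find_matching_ct ct_folders study_date → Pre_find_matching_ct ct_folders study_date → Spec_find_matching_ct ct_folders study_date (find_matching_ct ct_folders study_date)

-- ===== LEMMAS AND PROOFS =====

theorem pvRank_nonneg (d f : String) : 0 ≤ pvRank d f := by
  unfold pvRank; split_ifs <;> omega

theorem pvRank_le_two (d f : String) : pvRank d f ≤ 2 := by
  unfold pvRank; split_ifs <;> omega

theorem pvRank_eq_zero_iff (d f : String) : pvRank d f = 0 ↔ (pvKey f == d) = true := by
  unfold pvRank; split_ifs <;> simp_all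

theorem pvRank_eq_one_iff (d f : String) :
    pvRank d f = 1 ↔ ((pvKey f == d) = false ∧ PySem.Str.isIn d f = true) := by
  unfold pvRank; split_ifs <;> simp_all

theorem pvRank_eq_two (d f : String) (h1 : (pvKey f == d) = false)
    (h2 : PySem.Str.isIn d f = false) : pvRank d f = 2 := by
  unfold pvRank; rw [h1, h2]; simp

-- The running minimum over the ranked tail, with the accumulator's index below every
-- remaining index, selects: the accumulator if its rank is 0, else the first exact
-- match in the tail, else the accumulator if its rank is 1, else the first substring
-- match in the tail, else the accumulator.
theorem pvFold_eq (d : String) (fs : List String) :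
    ∀ (k i : Int) (f0 : String), i < k →
    (((PySem.List.enumerate fs k).map
        (fun p => (pvRank d p.2, p.1, p.2))).foldl
        (fun best y => if pvLt y best then y else best) (pvRank d f0, i, f0)).2.2 =
      (if pvRank d f0 = 0 then f0
       else match fs.find? (fun f => pvKey f == d) with
       | some f => f
       | none =>
         if pvRank d f0 = 1 then f0
         else match fs.find? (fun f => PySem.Str.isIn d f) with
         | some f => f
         | none => f0) := by
  induction fs with
  | nil => intro k i f0 _; simp
  | cons f1 rest ih =>
    intro k i f0 hik
    rw [PySem.List.enumerate_cons]
    simp only [List.map_cons, List.foldl_cons]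
    have hlt : pvLt (pvRank d f1, k, f1) (pvRank d f0, i, f0)
        = decide (pvRank d f1 < pvRank d f0) := by
      unfold pvLt
      rcases lt_trichotomy (pvRank d f1) (pvRank d f0) with h | h | h
      · simp [h]
      · have hki : ¬ k < i := by omega
        simp [h, hki]
      · have ha : ¬ pvRank d f1 < pvRank d f0 := by omega
        have hb : pvRank d f1 ≠ pvRank d f0 := by omega
        simp [ha, hb]
    rw [hlt]
    by_cases h1 : (pvKey f1 == d) = true
    · -- head is an exact match (rank 0)
      have hr1 : pvRank d f1 = 0 := (pvRank_eq_zero_iff d f1).mpr h1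
      rw [List.find?_cons_of_pos (by simpa using h1)]
      by_cases h0 : pvRank d f0 = 0
      · rw [if_neg (by simp [hr1, h0])]
        rw [ih (k+1) i f0 (by omega)]
        simp [h0]
      · have : (0:Int) < pvRank d f0 := by
          have := pvRank_nonneg d f0; omega
        rw [if_pos (by simp only [hr1]; exact decide_eq_true this)]
        rw [ih (k+1) k f1 (by omega)]
        simp [hr1, h0]
    · -- head not exact
      have h1' : (pvKey f1 == d) = false := by simpa using h1
      rw [List.find?_cons_of_neg (by simpa using h1')]
      by_cases h2 : PySem.Str.isIn d f1 = true
      · -- head rank 1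
        have hr1 : pvRank d f1 = 1 := (pvRank_eq_one_iff d f1).mpr ⟨h1', h2⟩
        rw [List.find?_cons_of_pos (by simpa using h2)]
        by_cases h0 : pvRank d f0 ≤ 1
        · rw [if_neg (by simp only [hr1]; simpa using by omega)]
          rw [ih (k+1) i f0 (by omega)]
          have := pvRank_nonneg d f0
          by_cases hz : pvRank d f0 = 0
          · simp [hz]
          · have ho : pvRank d f0 = 1 := by omega
            simp [ho]
        · rw [if_pos (by simp only [hr1]; exact decide_eq_true (by omega))]
          rw [ih (k+1) k f1 (by omega)]
          have hz : pvRank d f0 ≠ 0 := by omega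
          have ho : pvRank d f0 ≠ 1 := by omega
          simp [hr1, hz, ho]
      · -- head rank 2: never replaces (ranks are ≤ 2) and matches no find?
        have h2' : PySem.Str.isIn d f1 = false := by simpa using h2
        have hr1 : pvRank d f1 = 2 := pvRank_eq_two d f1 h1' h2'
        rw [List.find?_cons_of_neg (by simpa using h2')]
        rw [if_neg (by
          simp only [hr1]
          have := pvRank_le_two d f0
          simpa using by omega)]
        rw [ih (k+1) i f0 (by omega)]

-- filter/find? bridge used to read A's staged filters as first matches
theorem pvFilterCases {p : String → Bool} (l : List String) :
    (match l.filter p with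
     | f :: _ => some f
     | [] => none) = l.find? p := by
  rw [← List.head?_filter]
  cases l.filter p <;> rfl

-- ===== VERDICT (by name: the statement is the Claim_ definition above) =====
theorem find_matching_ct_spec : Claim_equal_find_matching_ct := by
  intro ct d _hDom _hPre
  unfold Spec_find_matching_ct find_matching_ct find_matching_ct_alt
  cases ct with
  | nil => simp
  | cons f0 rest =>
    rw [PySem.List.enumerate_cons]
    simp only [List.map_cons]
    rw [show (0:Int) + 1 = 1 by norm_num]
    rw [pvFold_eq d rest 1 0 f0 (by omega)]
    by_cases h1 : (pvKey f0 == d) = true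
    · have hr : pvRank d f0 = 0 := (pvRank_eq_zero_iff d f0).mpr h1
      simp [h1, hr]
    · have h1' : (pvKey f0 == d) = false := by simpa using h1
      by_cases h2 : PySem.Str.isIn d f0 = true
      · have hr : pvRank d f0 = 1 := (pvRank_eq_one_iff d f0).mpr ⟨h1', h2⟩
        simp only [List.filter_cons, h1', Bool.false_eq_true, if_false, hr]
        norm_num
        have h2c : PySem.Chars.isIn d.toList f0.toList = true := by
          simpa [PySem.Str.isIn] using h2
        cases hf : rest.find? (fun f => pvKey f == d) with
        | some f =>
          have h := pvFilterCases (p := fun f => pvKey f == d) rest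
          rw [hf] at h
          cases hfl : rest.filter (fun f => pvKey f == d) with
          | nil => rw [hfl] at h; simp at h
          | cons a t => rw [hfl] at h; simp at h; simp [h]
        | none =>
          have h := pvFilterCases (p := fun f => pvKey f == d) rest
          rw [hf] at h
          cases hfl : rest.filter (fun f => pvKey f == d) with
          | cons a t => rw [hfl] at h; simp at h
          | nil => simp [h2c]
      · have h2' : PySem.Str.isIn d f0 = false := by simpa using h2
        have hr : pvRank d f0 = 2 := pvRank_eq_two d f0 h1' h2'
        simp only [List.filter_cons, h1', h2', Bool.false_eq_true, if_false, hr]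
        norm_num
        cases hf : rest.find? (fun f => pvKey f == d) with
        | some f =>
          have h := pvFilterCases (p := fun f => pvKey f == d) rest
          rw [hf] at h
          cases hfl : rest.filter (fun f => pvKey f == d) with
          | nil => rw [hfl] at h; simp at h
          | cons a t => rw [hfl] at h; simp at h; simp [h]
        | none =>
          have h := pvFilterCases (p := fun f => pvKey f == d) rest
          rw [hf] at h
          cases hfl : rest.filter (fun f => pvKey f == d) with
          | cons a t => rw [hfl] at h; simp at h
          | nil =>
            cases hs : rest.find? (fun f => PySem.Chars.isIn d.toList f.toList) with
            | some f =>
              have g := pvFilterCases (p := fun f => PySem.Chars.isIn d.toList f.toList) rest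
              rw [hs] at g
              cases hsl : rest.filter (fun f => PySem.Chars.isIn d.toList f.toList) with
              | nil => rw [hsl] at g; simp at g
              | cons a t => rw [hsl] at g; simp at g; simp [g]
            | none =>
              have g := pvFilterCases (p := fun f => PySem.Chars.isIn d.toList f.toList) rest
              rw [hs] at g
              cases hsl : rest.filter (fun f => PySem.Chars.isIn d.toList f.toList) with
              | cons a t => rw [hsl] at g; simp at g
              | nil => simp
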